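-- pv_equiv track=rewrite | github.com/EdwardZehuaZhang/3d-printing-monorepo | rhino8-internal-wire/actual pluggin folder/rh8/libs/UNNcBibN/wire_router/core.py | _has_endpoint_keepout_reentry
-- ===== SOURCE A (Python) =====
-- from typing import Dict, FrozenSet, Iterable, Iterator, List, Optional, Sequence, Set, Tuple
--
-- GridIndex = Tuple[int, int, int]
--
-- _DILATION_OFFSET_CACHE: Dict[int, Tuple[Tuple[int, int, int], ...]] = {}
--
-- def _dilation_offsets(radius: int) -> Tuple[Tuple[int, int, int], ...]:
--     """Return cached offset tuples for the given Chebyshev radius."""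
--     if radius in _DILATION_OFFSET_CACHE:
--         return _DILATION_OFFSET_CACHE[radius]
--     offsets = tuple(
--         (dx, dy, dz)
--         for dx in range(-radius, radius + 1)
--         for dy in range(-radius, radius + 1)
--         for dz in range(-radius, radius + 1)
--     )
--     _DILATION_OFFSET_CACHE[radius] = offsets
--     return offsets
--
-- def _has_endpoint_keepout_reentry(
--     path: Sequence[GridIndex],
--     start: GridIndex,
--     goal: GridIndex,
--     radius: int,
-- ) -> bool:
--     """Return True when a routed segment re-enters its own endpoint keepout.
--
--     A valid segment may begin inside the start-node keepout and end inside the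
--     goal-node keepout, but once it leaves either endpoint keepout it should not
--     return to that same endpoint zone. Re-entry creates a loop near the node and
--     can short the pathway through the same touch node volume.
--     """
--     if radius <= 0 or len(path) < 3:
--         return False
--
--     start_zone = dilate_cells({start}, radius)
--     goal_zone = dilate_cells({goal}, radius)
--
--     # Ignore overlap between endpoint keepouts to avoid false positives when
--     # nodes are very close.
--     start_only = start_zone - goal_zone
--     goal_only = goal_zone - start_zone
--
--     if start_only:
--         index = 0
--         while index < len(path) and path[index] in start_only:
--             index += 1
--         if any(cell in start_only for cell in path[index:]):
--             return True
--
--     if goal_only: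
--         index = len(path) - 1
--         while index >= 0 and path[index] in goal_only:
--             index -= 1
--         if any(cell in goal_only for cell in path[: index + 1]):
--             return True
--
--     return False
--
-- def dilate_cells(cells: Iterable[GridIndex], radius: int) -> Set[GridIndex]:
--     cells = set(cells)
--     if radius <= 0:
--         return set(cells)
--
--     offsets = _dilation_offsets(radius)
--     dilated: Set[GridIndex] = set()
--     for cx, cy, cz in cells:
--         for dx, dy, dz in offsets:
--             dilated.add((cx + dx, cy + dy, cz + dz))
--     return dilated
-- ===== SOURCE B (Python) =====
-- def _has_endpoint_keepout_reentry(path, start, goal, radius):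
--     """Single stateful pass per endpoint using Chebyshev-distance tests;
--     no keepout sets are materialised."""
--     if radius <= 0 or len(path) < 3:
--         return False
--
--     def in_only(cell, own, other):
--         return (max(abs(cell[0] - own[0]), abs(cell[1] - own[1]), abs(cell[2] - own[2])) <= radius
--                 and max(abs(cell[0] - other[0]), abs(cell[1] - other[1]), abs(cell[2] - other[2])) > radius)
--
--     def reenters(cells, own, other):
--         left = False
--         for cell in cells:
--             if in_only(cell, own, other):
--                 if left:
--                     return True
--             else:
--                 left = True
--         return False
--
--     return reenters(path, start, goal) or reenters(reversed(path), goal, start)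
-- ===== Notes on version B (the rewrite author's own statement) =====
-- stated objective: faster
-- what changed: B never materialises the dilated keepout sets or the skip-prefix index scans: it tests Chebyshev distance to each endpoint arithmetically and detects re-entry in one stateful pass per endpoint (forward for start, backward for goal) with a 'left the zone' flag.
import Mathlib
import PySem

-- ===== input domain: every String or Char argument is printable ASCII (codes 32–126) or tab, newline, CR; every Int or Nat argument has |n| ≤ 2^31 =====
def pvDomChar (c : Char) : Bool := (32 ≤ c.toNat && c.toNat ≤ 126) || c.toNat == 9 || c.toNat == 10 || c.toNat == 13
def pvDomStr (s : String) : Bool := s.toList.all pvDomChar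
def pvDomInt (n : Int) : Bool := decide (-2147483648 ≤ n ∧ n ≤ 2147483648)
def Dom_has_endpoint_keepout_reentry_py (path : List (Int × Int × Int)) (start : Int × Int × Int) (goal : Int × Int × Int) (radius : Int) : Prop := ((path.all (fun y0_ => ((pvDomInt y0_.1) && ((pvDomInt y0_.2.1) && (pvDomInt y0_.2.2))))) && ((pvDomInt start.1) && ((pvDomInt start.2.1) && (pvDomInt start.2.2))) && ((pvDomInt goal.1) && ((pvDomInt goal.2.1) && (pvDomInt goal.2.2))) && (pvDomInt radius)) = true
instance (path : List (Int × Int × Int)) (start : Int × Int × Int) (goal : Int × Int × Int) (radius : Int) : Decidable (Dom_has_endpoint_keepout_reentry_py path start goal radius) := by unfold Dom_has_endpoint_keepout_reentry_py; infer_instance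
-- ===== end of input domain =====

-- B replaces A's materialised dilated keepout sets and skip-prefix-then-scan logic by per-endpoint
-- single passes with a Chebyshev-distance membership test and a "left the zone" flag (objective: faster).

-- ===== PORT A =====
-- _dilation_offsets(radius): the cache is invisible to the result; the offsets triple loop.
def pvOffsets (radius : Int) : List (Int × Int × Int) :=
  (PySem.List.pyRange (-radius) (radius + 1) 1).flatMap (fun dx =>
    (PySem.List.pyRange (-radius) (radius + 1) 1).flatMap (fun dy =>
      (PySem.List.pyRange (-radius) (radius + 1) 1).map (fun dz => (dx, dy, dz))))

-- dilate_cells: build set(cells); for each cell, add cell+offset for every offset.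
def pvDilateCells (cells : List (Int × Int × Int)) (radius : Int) : PySem.Set (Int × Int × Int) :=
  let cellsS : PySem.Set (Int × Int × Int) := PySem.Set.ofList cells
  if radius ≤ 0 then cellsS
  else
    cellsS.foldl (fun dil c =>
      (pvOffsets radius).foldl
        (fun dil o => PySem.Set.add dil (c.1 + o.1, c.2.1 + o.2.1, c.2.2 + o.2.2)) dil)
      PySem.Set.empty

-- 'index = 0; while index < len(path) and path[index] in zone: index += 1' — the resulting index
-- is the length of the in-zone prefix.
def pvCountPrefix (zone : PySem.Set (Int × Int × Int)) : List (Int × Int × Int) → Nat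
  | [] => 0
  | c :: rest => if PySem.Set.contains zone c then pvCountPrefix zone rest + 1 else 0

def has_endpoint_keepout_reentry_py (path : List (Int × Int × Int)) (start : Int × Int × Int) (goal : Int × Int × Int) (radius : Int) : Bool :=
  if radius ≤ 0 ∨ path.length < 3 then false
  else
    let start_zone := pvDilateCells [start] radius
    let goal_zone := pvDilateCells [goal] radius
    let start_only := PySem.Set.diff start_zone goal_zone
    let goal_only := PySem.Set.diff goal_zone start_zone
    -- start block: skip the in-zone prefix, then any() over path[index:]
    if start_only ≠ [] ∧ (path.drop (pvCountPrefix start_only path)).any (fun c => PySem.Set.contains start_only c) then true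
    -- goal block: 'index = len(path)-1; while index >= 0 and path[index] in goal_only: index -= 1'
    -- leaves index+1 = len(path) - (length of the in-zone suffix); any() over path[:index+1].
    else if goal_only ≠ [] ∧ (path.take (path.length - pvCountPrefix goal_only path.reverse)).any (fun c => PySem.Set.contains goal_only c) then true
    else false

-- ===== PORT B =====
def pvCheb (c e : Int × Int × Int) : Int :=
  max |c.1 - e.1| (max |c.2.1 - e.2.1| |c.2.2 - e.2.2|)

def pvInOnly (radius : Int) (own other : Int × Int × Int) (c : Int × Int × Int) : Bool :=
  decide (pvCheb c own ≤ radius) && !decide (pvCheb c other ≤ radius)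

-- reenters: one pass with a 'left the zone' flag.
def pvReenters (p : (Int × Int × Int) → Bool) : List (Int × Int × Int) → Bool → Bool
  | [], _ => false
  | c :: rest, left =>
    if p c then (if left then true else pvReenters p rest left)
    else pvReenters p rest true

def has_endpoint_keepout_reentry_py_alt (path : List (Int × Int × Int)) (start : Int × Int × Int) (goal : Int × Int × Int) (radius : Int) : Bool :=
  if radius ≤ 0 ∨ path.length < 3 then false
  else pvReenters (pvInOnly radius start goal) path false
    || pvReenters (pvInOnly radius goal start) path.reverse false

-- ===== PRECONDITION & SPEC =====
def Spec_has_endpoint_keepout_reentry_py (path : List (Int × Int × Int)) (start : Int × Int × Int) (goal : Int × Int × Int) (radius : Int) (out : Bool) : Prop := out = has_endpoint_keepout_reentry_py_alt path start goal radius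
instance (path : List (Int × Int × Int)) (start : Int × Int × Int) (goal : Int × Int × Int) (radius : Int) (out : Bool) : Decidable (Spec_has_endpoint_keepout_reentry_py path start goal radius out) := by unfold Spec_has_endpoint_keepout_reentry_py; infer_instance

-- ===== CLAIM (what is proved, stated in full; the proofs are below) =====
def Claim_equal_has_endpoint_keepout_reentry_py : Prop := ∀ (path : List (Int × Int × Int)) (start : Int × Int × Int) (goal : Int × Int × Int) (radius : Int), Dom_has_endpoint_keepout_reentry_py path start goal radius → Spec_has_endpoint_keepout_reentry_py path start goal radius (has_endpoint_keepout_reentry_py path start goal radius)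

-- ===== LEMMAS AND PROOFS =====

-- Membership in the dilation of a single cell is the Chebyshev ball of the radius.
theorem pv_mem_dilate_single (e : Int × Int × Int) (radius : Int) (h : 0 < radius)
    (c : Int × Int × Int) : c ∈ pvDilateCells [e] radius ↔ pvCheb c e ≤ radius := by
  have hr : ¬ radius ≤ 0 := by omega
  simp only [pvDilateCells, hr, if_false]
  rw [show PySem.Set.ofList [e] = [e] from rfl]
  simp only [List.foldl_cons, List.foldl_nil]
  rw [PySem.Set.mem_foldl_add]
  simp only [PySem.Set.empty, List.not_mem_nil, false_or, pvOffsets, List.mem_flatMap,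
    List.mem_map, PySem.List.mem_pyRange_one, pvCheb]
  constructor
  · rintro ⟨b, ⟨dx, ⟨h1, h2⟩, dy, ⟨h3, h4⟩, dz, ⟨h5, h6⟩, rfl⟩, rfl⟩
    simp only [max_le_iff, abs_le]
    omega
  · intro hle
    simp only [max_le_iff, abs_le] at hle
    refine ⟨(c.1 - e.1, c.2.1 - e.2.1, c.2.2 - e.2.2),
      ⟨c.1 - e.1, by omega, c.2.1 - e.2.1, by omega, c.2.2 - e.2.2, by omega, rfl⟩, ?_⟩
    simp

-- The contains test on start_only/goal_only is exactly B's Chebyshev predicate.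
theorem pv_contains_diff_eq (own other : Int × Int × Int) (radius : Int) (h : 0 < radius) :
    (fun c => PySem.Set.contains
      (PySem.Set.diff (pvDilateCells [own] radius) (pvDilateCells [other] radius)) c)
      = pvInOnly radius own other := by
  funext c
  rw [Bool.eq_iff_iff, PySem.Set.contains_iff, PySem.Set.mem_diff,
    pv_mem_dilate_single own radius h, pv_mem_dilate_single other radius h]
  simp [pvInOnly]

-- A's while-loop index: dropping the counted prefix is dropWhile.
theorem pv_drop_countPrefix (zone : PySem.Set (Int × Int × Int)) (xs : List (Int × Int × Int)) :
    xs.drop (pvCountPrefix zone xs) = xs.dropWhile (fun c => PySem.Set.contains zone c) := by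
  induction xs with
  | nil => rfl
  | cons x rest ih =>
    by_cases hx : x ∈ zone
    · simp [pvCountPrefix, hx, ih]
    · simp [pvCountPrefix, hx]

-- B's pass with the flag already set is a plain any().
theorem pv_reenters_true (p : (Int × Int × Int) → Bool) (xs : List (Int × Int × Int)) :
    pvReenters p xs true = xs.any p := by
  induction xs with
  | nil => rfl
  | cons x rest ih =>
    by_cases hx : p x
    · simp [pvReenters, hx]
    · simp [pvReenters, hx, ih]

-- B's pass from the initial flag is any() after dropWhile.
theorem pv_reenters_false (p : (Int × Int × Int) → Bool) (xs : List (Int × Int × Int)) :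
    pvReenters p xs false = (xs.dropWhile p).any p := by
  induction xs with
  | nil => rfl
  | cons x rest ih =>
    by_cases hx : p x
    · simp [pvReenters, hx, ih]
    · simp [pvReenters, hx, pv_reenters_true]

-- The core pointwise equality, radius > 0 and the guard already passed.
theorem pv_core_eq (path : List (Int × Int × Int)) (start goal : Int × Int × Int)
    (radius : Int) (hr : 0 < radius) :
    has_endpoint_keepout_reentry_py path start goal radius
      = has_endpoint_keepout_reentry_py_alt path start goal radius := by
  simp only [has_endpoint_keepout_reentry_py, has_endpoint_keepout_reentry_py_alt]
  by_cases hgate : radius ≤ 0 ∨ path.length < 3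
  · simp [hgate]
  simp only [hgate, if_false]
  rw [pv_reenters_false, pv_reenters_false,
    ← pv_contains_diff_eq start goal radius hr, ← pv_contains_diff_eq goal start radius hr]
  have htake : path.take (path.length -
      pvCountPrefix (PySem.Set.diff (pvDilateCells [goal] radius) (pvDilateCells [start] radius)) path.reverse)
      = (path.reverse.dropWhile (fun c => PySem.Set.contains
          (PySem.Set.diff (pvDilateCells [goal] radius) (pvDilateCells [start] radius)) c)).reverse := by
    rw [← pv_drop_countPrefix, List.drop_reverse, List.reverse_reverse]
  rw [pv_drop_countPrefix, htake, List.any_reverse]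
  generalize hS : PySem.Set.diff (pvDilateCells [start] radius) (pvDilateCells [goal] radius) = S
  generalize hG : PySem.Set.diff (pvDilateCells [goal] radius) (pvDilateCells [start] radius) = G
  have h1 : S = [] → ((path.dropWhile (fun c => PySem.Set.contains S c)).any
      (fun c => PySem.Set.contains S c)) = false := by
    intro hs; subst hs; simp [PySem.Set.contains]
  have h2 : G = [] → ((path.reverse.dropWhile (fun c => PySem.Set.contains G c)).any
      (fun c => PySem.Set.contains G c)) = false := by
    intro hs; subst hs; simp [PySem.Set.contains]
  cases hb1 : (path.dropWhile (fun c => PySem.Set.contains S c)).any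
      (fun c => PySem.Set.contains S c) with
  | true =>
    have hne : S ≠ [] := by intro hs; rw [h1 hs] at hb1; cases hb1
    simp [hne]
  | false =>
    cases hb2 : (path.reverse.dropWhile (fun c => PySem.Set.contains G c)).any
        (fun c => PySem.Set.contains G c) with
    | true =>
      have hne : G ≠ [] := by intro hs; rw [h2 hs] at hb2; cases hb2
      simp [hne]
    | false => simp

-- ===== VERDICT (by name: the statement is the Claim_ definition above) =====
theorem has_endpoint_keepout_reentry_py_spec : Claim_equal_has_endpoint_keepout_reentry_py := by
  intro path start goal radius _
  unfold Spec_has_endpoint_keepout_reentry_py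
  by_cases hgate : radius ≤ 0 ∨ path.length < 3
  · simp [has_endpoint_keepout_reentry_py, has_endpoint_keepout_reentry_py_alt, hgate]
  · have hr : 0 < radius := by
      rcases not_or.mp hgate with ⟨h1, _⟩; omega
    exact pv_core_eq path start goal radius hr
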